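-- pv_equiv track=rewrite | github.com/donkrazy/algoorithm | 8.7-PI.py | difficulty
-- ===== SOURCE A (Python) =====
-- def difficulty(b):
--     # Assume that 3 <= len(b) <= 5
--     b = [int(i) for i in b]
--
--     # case 1
--     if len(set(b)) == 1:
--         return 1
--
--     # case 2
--     if all(b[i] - b[i - 1] == 1 for i in range(1, len(b))) or all(b[i] - b[i - 1] == -1 for i in range(1, len(b))):
--         return 2
--
--     # case 3
--     if len(set(b)) == 2 and len(set(b[1::2])) == 1 and len(set(b[::2])) == 1:
--         return 4
--
--     # case 4
--     d = b[1] - b[0]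
--     if all(b[i] - b[i - 1] == d for i in range(1, len(b))):
--         return 5
--
--     # case 5
--     return 10
-- ===== SOURCE B (Python) =====
-- def difficulty(b):
--     # Classify via the list of consecutive differences, built once.
--     v = [int(x) for x in b]
--     diffs = [q - p for p, q in zip(v, v[1:])]
--
--     # case 1: constant sequence (nonempty, all diffs zero)
--     if v and all(d == 0 for d in diffs):
--         return 1
--
--     # case 2: steps of +1 throughout, or -1 throughout
--     if all(d == 1 for d in diffs) or all(d == -1 for d in diffs):
--         return 2
--
--     # case 3: two values strictly alternating = diffs alternate in sign, equal magnitude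
--     if diffs and diffs[0] != 0 and all(q == -p for p, q in zip(diffs, diffs[1:])):
--         return 4
--
--     # case 4: arithmetic progression (all diffs equal)
--     if all(d == diffs[0] for d in diffs):
--         return 5
--
--     # case 5
--     return 10
-- ===== Notes on version B (the rewrite author's own statement) =====
-- stated objective: alternative
-- what changed: B builds the consecutive-difference list once and decides every case from diff patterns (all zero, all +/-1, strictly alternating with nonzero start, all equal), replacing A's set-cardinality tests, stride-2 slice-set tests and repeated index-range scans; Pre_ excludes only inputs where int() raises ValueError.
import Mathlib
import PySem

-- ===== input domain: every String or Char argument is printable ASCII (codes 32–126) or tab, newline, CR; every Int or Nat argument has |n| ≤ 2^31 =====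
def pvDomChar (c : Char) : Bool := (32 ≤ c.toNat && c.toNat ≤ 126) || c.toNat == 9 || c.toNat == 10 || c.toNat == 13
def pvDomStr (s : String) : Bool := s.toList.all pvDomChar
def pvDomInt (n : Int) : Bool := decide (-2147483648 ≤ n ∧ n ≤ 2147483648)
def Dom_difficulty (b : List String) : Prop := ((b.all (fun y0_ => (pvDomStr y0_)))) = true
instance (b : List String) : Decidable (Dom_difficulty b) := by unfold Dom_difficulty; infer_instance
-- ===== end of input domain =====

-- B replaces A's set-cardinality / stride-slice tests by tests on the consecutive-difference
-- list built once (objective: alternative decomposition, same O(n) cost).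

-- ===== PORT A =====
def difficulty (b : List String) : Int :=
  let v := b.map (fun s => (PySem.Int.ofStr? s).getD 0)   -- int(i); Pre_ guarantees every parse succeeds
  if PySem.Set.len (PySem.Set.ofList v) == 1 then 1
  else if ((PySem.List.pyRange 1 (v.length : Int) 1).all
            (fun i => PySem.List.pyGetD v i 0 - PySem.List.pyGetD v (i-1) 0 == 1))
       || ((PySem.List.pyRange 1 (v.length : Int) 1).all
            (fun i => PySem.List.pyGetD v i 0 - PySem.List.pyGetD v (i-1) 0 == -1)) then 2
  else if PySem.Set.len (PySem.Set.ofList v) == 2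
       && PySem.Set.len (PySem.Set.ofList ((PySem.List.slice? v (some 1) none 2).getD [])) == 1
       && PySem.Set.len (PySem.Set.ofList ((PySem.List.slice? v none none 2).getD [])) == 1 then 4
  else
    let d := PySem.List.pyGetD v 1 0 - PySem.List.pyGetD v 0 0
    if (PySem.List.pyRange 1 (v.length : Int) 1).all
         (fun i => PySem.List.pyGetD v i 0 - PySem.List.pyGetD v (i-1) 0 == d) then 5
    else 10

-- ===== PORT B =====
def difficulty_alt (b : List String) : Int :=
  let v := b.map (fun s => (PySem.Int.ofStr? s).getD 0)   -- int(x); Pre_ guarantees every parse succeeds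
  let diffs := (v.zip v.tail).map (fun p => p.2 - p.1)    -- zip(v, v[1:]); v[1:] = v.tail (PySem.List.slice_from_one)
  if !v.isEmpty && diffs.all (fun d => d == 0) then 1
  else if diffs.all (fun d => d == 1) || diffs.all (fun d => d == -1) then 2
  else if !diffs.isEmpty && !(diffs.headD 0 == 0)
       && (diffs.zip diffs.tail).all (fun p => p.2 == -p.1) then 4
  else if diffs.all (fun d => d == diffs.headD 0) then 5
  else 10

-- ===== PRECONDITION & SPEC =====
-- Pre_ excludes exactly the inputs where Python's int(i) raises ValueError (a non-integer string).
def Pre_difficulty (b : List String) : Prop :=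
  (b.all (fun s => (PySem.Int.ofStr? s).isSome)) = true
instance (b : List String) : Decidable (Pre_difficulty b) := by unfold Pre_difficulty; infer_instance

def pvWitness_difficulty : List String := ["1", "2", "3"]

def Spec_difficulty (b : List String) (out : Int) : Prop := out = difficulty_alt b
instance (b : List String) (out : Int) : Decidable (Spec_difficulty b out) := by unfold Spec_difficulty; infer_instance

-- ===== CLAIM (what is proved, stated in full; the proofs are below) =====
def Claim_equal_difficulty : Prop := ∀ (b : List String), Dom_difficulty b → Pre_difficulty b → Spec_difficulty b (difficulty b)

-- ===== LEMMAS AND PROOFS =====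

mutual
def pvEvens : List Int → List Int
  | [] => []
  | x :: xs => x :: pvOdds xs
def pvOdds : List Int → List Int
  | [] => []
  | _ :: xs => pvEvens xs
end

theorem pv_len_eo : ∀ v : List Int, (pvEvens v).length = (v.length + 1) / 2 ∧ (pvOdds v).length = v.length / 2 := by
  intro v
  induction v with
  | nil => exact ⟨rfl, rfl⟩
  | cons x xs ih =>
    refine ⟨?_, ?_⟩
    · simp only [pvEvens, List.length_cons, ih.2]
      omega
    · simp only [pvOdds, List.length_cons, ih.1]

theorem pv_getD_eo : ∀ (v : List Int) (k : Nat),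
    (pvEvens v).getD k 0 = v.getD (2*k) 0 ∧ (pvOdds v).getD k 0 = v.getD (2*k+1) 0 := by
  intro v
  induction v with
  | nil => intro k; exact ⟨rfl, rfl⟩
  | cons x xs ih =>
    intro k
    refine ⟨?_, ?_⟩
    · cases k with
      | zero => rfl
      | succ m =>
        simp only [pvEvens, List.getD_cons_succ]
        have h2 : 2*(m+1) = (2*m+1)+1 := by omega
        rw [(ih m).2, h2, List.getD_cons_succ]
    · simp only [pvOdds]
      rw [(ih k).1]
      rw [List.getD_cons_succ]

theorem pv_map_range_evens (v : List Int) :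
    (List.range ((v.length + 1) / 2)).map (fun k => v.getD (2*k) 0) = pvEvens v := by
  apply List.ext_getElem
  · simp [(pv_len_eo v).1]
  · intro i h1 h2
    simp only [List.getElem_map, List.getElem_range]
    rw [← List.getD_eq_getElem (pvEvens v) 0 h2, (pv_getD_eo v i).1]

theorem pv_map_range_odds (v : List Int) :
    (List.range (v.length / 2)).map (fun k => v.getD (2*k+1) 0) = pvOdds v := by
  apply List.ext_getElem
  · simp [(pv_len_eo v).2]
  · intro i h1 h2
    simp only [List.getElem_map, List.getElem_range]
    rw [← List.getD_eq_getElem (pvOdds v) 0 h2, (pv_getD_eo v i).2]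

theorem pv_slice_even (v : List Int) : PySem.List.slice? v none none 2 = some (pvEvens v) := by
  rw [PySem.List.slice?]
  rw [if_neg (by norm_num)]
  have hidx : PySem.List.sliceIndices v.length none none 2 = (0, (v.length : Int), 2) := by
    simp [PySem.List.sliceIndices]
  rw [hidx]
  simp only
  have hcount : (if (0:Int) < 2 then if (0:Int) < (v.length:Int) then (((v.length:Int) - 0 + 2 - 1) / 2).toNat else 0
      else if ((v.length:Int)) < 0 then (((0:Int) - (v.length:Int) + -2 - 1) / -2).toNat else 0) = (v.length + 1) / 2 := by
    split_ifs <;> omega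
  rw [hcount]
  congr 1
  have hfm : ∀ k ∈ List.range ((v.length + 1) / 2),
      v[((0:Int) + 2*(k:Int)).toNat]? = some ((fun k => v.getD (2*k) 0) k) := by
    intro k hk
    rw [List.mem_range] at hk
    have h2k : 2*k < v.length := by omega
    have ht : ((0:Int) + 2*(k:Int)).toNat = 2*k := by omega
    simp only [ht, List.getElem?_eq_getElem h2k, List.getD_eq_getElem v 0 h2k]
  rw [List.filterMap_congr hfm]
  have hc : (fun x => some ((fun k => v.getD (2*k) 0) x)) = some ∘ (fun k => v.getD (2*k) 0) := rfl
  rw [hc, List.filterMap_eq_map]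
  exact pv_map_range_evens v

theorem pv_slice_odd (v : List Int) : PySem.List.slice? v (some 1) none 2 = some (pvOdds v) := by
  rw [PySem.List.slice?]
  rw [if_neg (by norm_num)]
  have hidx : PySem.List.sliceIndices v.length (some 1) none 2 = (min 1 (v.length : Int), (v.length : Int), 2) := by
    simp [PySem.List.sliceIndices]
  rw [hidx]
  simp only
  have hcount : (if (0:Int) < 2 then if min 1 (v.length:Int) < (v.length:Int) then (((v.length:Int) - min 1 (v.length:Int) + 2 - 1) / 2).toNat else 0
      else if ((v.length:Int)) < min 1 (v.length:Int) then ((min 1 (v.length:Int) - (v.length:Int) + -2 - 1) / -2).toNat else 0) = v.length / 2 := by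
    split_ifs <;> omega
  rw [hcount]
  congr 1
  have hfm : ∀ k ∈ List.range (v.length / 2),
      v[(min 1 (v.length:Int) + 2*(k:Int)).toNat]? = some ((fun k => v.getD (2*k+1) 0) k) := by
    intro k hk
    rw [List.mem_range] at hk
    have h2k : 2*k+1 < v.length := by omega
    have ht : (min 1 (v.length:Int) + 2*(k:Int)).toNat = 2*k+1 := by omega
    simp only [ht, List.getElem?_eq_getElem h2k, List.getD_eq_getElem v 0 h2k]
  rw [List.filterMap_congr hfm]
  have hc : (fun x => some ((fun k => v.getD (2*k+1) 0) x)) = some ∘ (fun k => v.getD (2*k+1) 0) := rfl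
  rw [hc, List.filterMap_eq_map]
  exact pv_map_range_odds v

theorem pv_zipAll (f : Int → Int → Bool) : ∀ v : List Int,
    ((List.range (v.length - 1)).all (fun k => f (v.getD (k+1) 0) (v.getD k 0)))
    = (v.zip v.tail).all (fun p => f p.2 p.1) := by
  intro v
  induction v with
  | nil => rfl
  | cons x xs ih =>
    cases xs with
    | nil => rfl
    | cons y t =>
      simp only [List.length_cons, Nat.add_sub_cancel] at *
      rw [List.range_succ_eq_map]
      simp only [List.all_cons, List.all_map, List.zip_cons_cons, List.tail_cons,
        Function.comp_def, Nat.succ_eq_add_one,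
        List.getD_cons_succ, List.getD_cons_zero] at *
      rw [← ih]

theorem pv_rangeAll (f : Int → Int → Bool) (v : List Int) :
    ((PySem.List.pyRange 1 (v.length : Int) 1).all
      (fun i => f (PySem.List.pyGetD v i 0) (PySem.List.pyGetD v (i-1) 0)))
    = (v.zip v.tail).all (fun p => f p.2 p.1) := by
  rw [PySem.List.pyRange_one, ← pv_zipAll f v, List.all_map]
  have hlen : ((v.length : Int) - 1).toNat = v.length - 1 := by omega
  rw [hlen]
  congr 1
  funext k
  have h1 : (1 : Int) + (k : Int) = ((k+1 : Nat) : Int) := by push_cast; ring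
  have h2 : ((k+1 : Nat) : Int) - 1 = ((k : Nat) : Int) := by push_cast; ring
  simp only [Function.comp_def, h1, h2, PySem.List.pyGetD_natCast]

-- generic adjacent-pair chain
def pvChain (f : Int → Int → Bool) : List Int → Bool
  | x :: y :: t => f y x && pvChain f (y :: t)
  | _ => true

theorem pv_zip_chain (f : Int → Int → Bool) : ∀ l : List Int,
    ((l.zip l.tail).all (fun p => f p.2 p.1)) = pvChain f l := by
  intro l
  induction l with
  | nil => rfl
  | cons x xs ih =>
    cases xs with
    | nil => rfl
    | cons y t =>
      simp only [List.tail_cons, List.zip_cons_cons, List.all_cons, pvChain]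
      rw [← ih]
      simp [List.tail_cons]

theorem pv_chain_eq_all (g : Int → Int → Bool)
    (hg : ∀ a b, g a b = (a == b)) : ∀ (x : Int) (xs : List Int),
    pvChain g (x :: xs) = xs.all (fun z => z == x) := by
  intro x xs
  induction xs generalizing x with
  | nil => rfl
  | cons y t ih =>
    simp only [pvChain, List.all_cons, ih y, hg]
    by_cases h : y = x
    · subst h; rfl
    · simp [show (y == x) = false from by simp [h]]

theorem pv_chain_zero (x : Int) (xs : List Int) :
    pvChain (fun b a => b - a == 0) (x :: xs) = xs.all (fun z => z == x) := by
  apply pv_chain_eq_all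
  intro a b
  rw [Bool.eq_iff_iff]
  simp only [beq_iff_eq]
  omega

def pvDiffs : List Int → List Int
  | x :: y :: t => (y - x) :: pvDiffs (y :: t)
  | _ => []

theorem pv_diffs : ∀ v : List Int, (v.zip v.tail).map (fun p => p.2 - p.1) = pvDiffs v := by
  intro v
  induction v with
  | nil => rfl
  | cons x xs ih =>
    cases xs with
    | nil => rfl
    | cons y t =>
      simp only [List.tail_cons, List.zip_cons_cons, List.map_cons, pvDiffs]
      rw [← ih]
      simp [List.tail_cons]

-- alternation of diffs = both parity classes constant
theorem pv_alt : ∀ (t : List Int) (x y : Int),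
    pvChain (fun b a => b == -a) (pvDiffs (x :: y :: t))
    = ((pvEvens t).all (fun z => z == x) && (pvOdds t).all (fun z => z == y)) := by
  intro t
  induction t with
  | nil => intro x y; rfl
  | cons z t' ih =>
    intro x y
    simp only [pvDiffs, pvChain, pvEvens, pvOdds, List.all_cons]
    rw [show (z - y) :: pvDiffs (z :: t') = pvDiffs (y :: z :: t') from rfl, ih y z]
    rw [Bool.eq_iff_iff]
    simp only [Bool.and_eq_true, beq_iff_eq]
    have hiff : (z - y = -(y - x)) ↔ (z = x) := by omega
    constructor
    · rintro ⟨h1, h2, h3⟩; exact ⟨⟨hiff.mp h1, by simpa [hiff.mp h1] using h3⟩, h2⟩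
    · rintro ⟨⟨h1, h3⟩, h2⟩; exact ⟨hiff.mpr h1, h2, by simpa [h1] using h3⟩

theorem pv_mem_eo : ∀ (l : List Int) (z : Int), z ∈ l → z ∈ pvEvens l ∨ z ∈ pvOdds l := by
  intro l
  induction l with
  | nil => intro z h; cases h
  | cons a r ih =>
    intro z hz
    rcases List.mem_cons.mp hz with rfl | hr
    · left; simp [pvEvens]
    · rcases ih z hr with h | h
      · right; simpa [pvOdds] using h
      · left; simp [pvEvens]; right; exact h

theorem pv_foldl_add_const (x : Int) : ∀ xs : List Int, (xs.all (fun z => z == x)) = true →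
    xs.foldl PySem.Set.add [x] = [x] := by
  intro xs
  induction xs with
  | nil => intro _; rfl
  | cons y t ih =>
    intro h
    simp only [List.all_cons, Bool.and_eq_true, beq_iff_eq] at h
    obtain ⟨rfl, h2⟩ := h
    have : PySem.Set.add [y] y = [y] := by simp [PySem.Set.add]
    simpa [List.foldl_cons, this] using ih (by simpa using h2)

theorem pv_ofList_const (x : Int) (xs : List Int) (h : (xs.all (fun z => z == x)) = true) :
    PySem.Set.ofList (x :: xs) = [x] := by
  have h0 : PySem.Set.add PySem.Set.empty x = [x] := rfl
  rw [PySem.Set.ofList, List.foldl_cons, h0]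
  exact pv_foldl_add_const x xs h

theorem pv_card_one (x : Int) (xs : List Int) :
    ((PySem.Set.ofList (x :: xs)).length = 1) ↔ (xs.all (fun z => z == x) = true) := by
  constructor
  · intro h
    obtain ⟨a, ha⟩ := List.length_eq_one_iff.mp h
    have hx : x ∈ PySem.Set.ofList (x :: xs) := (PySem.Set.mem_ofList _ _).mpr (by simp)
    rw [ha] at hx
    simp only [List.mem_singleton] at hx
    subst hx
    simp only [List.all_eq_true, beq_iff_eq]
    intro z hz
    have : z ∈ PySem.Set.ofList (x :: xs) := (PySem.Set.mem_ofList _ _).mpr (by simp [hz])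
    rw [ha] at this; simpa using this
  · intro h
    rw [pv_ofList_const x xs h]; rfl

-- card = 2 lemma
theorem pv_card_two (x y : Int) (l : List Int) (hxy : x ≠ y)
    (hsub : ∀ z ∈ l, z = x ∨ z = y) (hx : x ∈ l) (hy : y ∈ l) :
    (PySem.Set.ofList l).length = 2 := by
  have hnd := PySem.Set.nodup_ofList l
  have hmem : ∀ z, z ∈ PySem.Set.ofList l ↔ z ∈ l := fun z => PySem.Set.mem_ofList l z
  have hfin : (PySem.Set.ofList l).toFinset = {x, y} := by
    ext z
    simp only [List.mem_toFinset, hmem, Finset.mem_insert, Finset.mem_singleton]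
    constructor
    · exact hsub z
    · rintro (rfl | rfl); exact hx; exact hy
  have := List.toFinset_card_of_nodup hnd
  rw [hfin] at this
  rw [← this, Finset.card_pair hxy]

theorem pv_c1 (x : Int) (xs : List Int) :
    (PySem.Set.len (PySem.Set.ofList (x :: xs)) == 1)
    = (!(x :: xs).isEmpty && pvChain (fun b a => b - a == 0) (x :: xs)) := by
  rw [pv_chain_zero]
  rw [Bool.eq_iff_iff]
  simp only [PySem.Set.len, beq_iff_eq, List.isEmpty_cons, Bool.not_false, Bool.true_and]
  rw [← pv_card_one x xs]
  constructor
  · intro h; exact_mod_cast h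
  · intro h; exact_mod_cast h

theorem pv_sub_two (x y : Int) (t : List Int)
    (hE : (pvEvens t).all (fun z => z == x) = true)
    (hO : (pvOdds t).all (fun z => z == y) = true) :
    ∀ z ∈ x :: y :: t, z = x ∨ z = y := by
  intro z hz
  simp only [List.all_eq_true, beq_iff_eq] at hE hO
  rcases List.mem_cons.mp hz with rfl | hz'
  · exact Or.inl rfl
  rcases List.mem_cons.mp hz' with rfl | hz''
  · exact Or.inr rfl
  rcases pv_mem_eo t z hz'' with h | h
  · exact Or.inl (hE z h)
  · exact Or.inr (hO z h)

theorem pv_c3 (x y : Int) (t : List Int) :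
    (PySem.Set.len (PySem.Set.ofList (x :: y :: t)) == 2
      && PySem.Set.len (PySem.Set.ofList ((PySem.List.slice? (x :: y :: t) (some 1) none 2).getD [])) == 1
      && PySem.Set.len (PySem.Set.ofList ((PySem.List.slice? (x :: y :: t) none none 2).getD [])) == 1)
    = (!(((x :: y :: t).zip (x :: y :: t).tail).map (fun p => p.2 - p.1)).isEmpty
      && !((((x :: y :: t).zip (x :: y :: t).tail).map (fun p => p.2 - p.1)).headD 0 == 0)
      && (((((x :: y :: t).zip (x :: y :: t).tail).map (fun p => p.2 - p.1)).zip
            ((((x :: y :: t).zip (x :: y :: t).tail).map (fun p => p.2 - p.1))).tail).all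
          (fun p => p.2 == -p.1))) := by
  rw [pv_slice_odd, pv_slice_even, Option.getD_some, Option.getD_some]
  rw [pv_diffs]
  rw [pv_zip_chain (fun b a => b == -a) (pvDiffs (x :: y :: t))]
  rw [show pvOdds (x :: y :: t) = y :: pvOdds t from rfl,
      show pvEvens (x :: y :: t) = x :: pvEvens t from rfl,
      show pvDiffs (x :: y :: t) = (y - x) :: pvDiffs (y :: t) from rfl]
  rw [show pvChain (fun b a => b == -a) ((y - x) :: pvDiffs (y :: t))
        = pvChain (fun b a => b == -a) (pvDiffs (x :: y :: t)) from rfl, pv_alt]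
  rw [Bool.eq_iff_iff]
  simp only [Bool.and_eq_true, beq_iff_eq, List.isEmpty_cons, Bool.not_false, Bool.true_and,
    List.headD_cons, Bool.not_eq_eq_eq_not, Bool.not_true, beq_eq_false_iff_ne, ne_eq,
    PySem.Set.len]
  constructor
  · rintro ⟨⟨h2, hO1⟩, hE1⟩
    have hO : (pvOdds t).all (fun z => z == y) = true := (pv_card_one y (pvOdds t)).mp (by exact_mod_cast hO1)
    have hE : (pvEvens t).all (fun z => z == x) = true := (pv_card_one x (pvEvens t)).mp (by exact_mod_cast hE1)
    refine ⟨?_, hE, hO⟩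
    intro h0
    have hyx : y = x := by omega
    subst hyx
    have hall : ((y :: t).all (fun z => z == y)) = true := by
      simp only [List.all_cons, Bool.and_eq_true, beq_iff_eq, List.all_eq_true]
      refine ⟨by simp, ?_⟩
      intro z hz
      rcases pv_mem_eo t z hz with h | h
      · simpa using (List.all_eq_true.mp hE) z h
      · simpa using (List.all_eq_true.mp hO) z h
    have := pv_ofList_const y (y :: t) hall
    rw [this] at h2
    simp at h2
  · rintro ⟨h0, hE, hO⟩
    have hxy : x ≠ y := by omega
    have h2 := pv_card_two x y (x :: y :: t) hxy (pv_sub_two x y t hE hO)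
      (by simp) (by simp)
    refine ⟨⟨by exact_mod_cast h2, ?_⟩, ?_⟩
    · exact_mod_cast (pv_card_one y (pvOdds t)).mpr hO
    · exact_mod_cast (pv_card_one x (pvEvens t)).mpr hE

theorem pv_all_diffs (g : Int → Bool) (v : List Int) :
    ((v.zip v.tail).map (fun p => p.2 - p.1)).all g = pvChain (fun b a => g (b - a)) v := by
  rw [List.all_map]
  simp only [Function.comp_def]
  exact pv_zip_chain (fun b a => g (b - a)) v

theorem pv_core (v : List Int) :
    (if PySem.Set.len (PySem.Set.ofList v) == 1 then (1:Int)
     else if ((PySem.List.pyRange 1 (v.length : Int) 1).all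
              (fun i => PySem.List.pyGetD v i 0 - PySem.List.pyGetD v (i-1) 0 == 1))
          || ((PySem.List.pyRange 1 (v.length : Int) 1).all
              (fun i => PySem.List.pyGetD v i 0 - PySem.List.pyGetD v (i-1) 0 == -1)) then 2
     else if PySem.Set.len (PySem.Set.ofList v) == 2
          && PySem.Set.len (PySem.Set.ofList ((PySem.List.slice? v (some 1) none 2).getD [])) == 1
          && PySem.Set.len (PySem.Set.ofList ((PySem.List.slice? v none none 2).getD [])) == 1 then 4
     else if (PySem.List.pyRange 1 (v.length : Int) 1).all
              (fun i => PySem.List.pyGetD v i 0 - PySem.List.pyGetD v (i-1) 0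
                == PySem.List.pyGetD v 1 0 - PySem.List.pyGetD v 0 0) then 5
     else 10)
    =
    (if !v.isEmpty && ((v.zip v.tail).map (fun p => p.2 - p.1)).all (fun d => d == 0) then 1
     else if ((v.zip v.tail).map (fun p => p.2 - p.1)).all (fun d => d == 1)
          || ((v.zip v.tail).map (fun p => p.2 - p.1)).all (fun d => d == -1) then 2
     else if !((v.zip v.tail).map (fun p => p.2 - p.1)).isEmpty
          && !(((v.zip v.tail).map (fun p => p.2 - p.1)).headD 0 == 0)
          && ((((v.zip v.tail).map (fun p => p.2 - p.1)).zip
                ((v.zip v.tail).map (fun p => p.2 - p.1)).tail).all (fun p => p.2 == -p.1)) then 4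
     else if ((v.zip v.tail).map (fun p => p.2 - p.1)).all
              (fun d => d == ((v.zip v.tail).map (fun p => p.2 - p.1)).headD 0) then 5
     else 10) := by
  match v with
  | [] => decide
  | [x] =>
    simp [PySem.Set.ofList, PySem.Set.add, PySem.Set.empty, PySem.Set.len]
  | x :: y :: t =>
    have hd1 : PySem.List.pyGetD (x :: y :: t) 1 0 = y := by simp [pysem]
    have hd0 : PySem.List.pyGetD (x :: y :: t) 0 0 = x := by simp [pysem]
    have hh : (((x :: y :: t).zip (x :: y :: t).tail).map (fun p => p.2 - p.1)).headD 0 = y - x := rfl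
    rw [pv_c3 x y t]
    simp only [hd1, hd0, hh]
    rw [pv_rangeAll (fun a b => a - b == 1) (x :: y :: t),
        pv_rangeAll (fun a b => a - b == -1) (x :: y :: t),
        pv_rangeAll (fun a b => a - b == (y - x)) (x :: y :: t),
        pv_zip_chain (fun a b => a - b == 1) (x :: y :: t),
        pv_zip_chain (fun a b => a - b == -1) (x :: y :: t),
        pv_zip_chain (fun a b => a - b == (y - x)) (x :: y :: t)]
    simp only [pv_all_diffs]
    rw [pv_c1 x (y :: t)]

-- ===== VERDICT (by name: the statement is the Claim_ definition above) =====
theorem difficulty_spec : Claim_equal_difficulty := by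
  intro b _ _
  unfold Spec_difficulty difficulty difficulty_alt
  exact pv_core (b.map (fun s => (PySem.Int.ofStr? s).getD 0))
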